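-- pv_equiv track=rewrite | github.com/pypi-data/pypi-mirror-300 | packages/minium/minium-1.6.0.tar.gz/minium-1.6.0/minium/framework/caseinspect.py | update_module_info
-- ===== SOURCE A (Python) =====
-- def update_module_info(module_name, human_name_mapping):
--     module_sp = module_name.split(".")
--     human_info = {}
--     for i in range(len(module_sp)):
--         m = ".".join(module_sp[: len(module_sp) - i])
--         if m in human_name_mapping:
--             human_info = human_name_mapping[m]
--     return human_info
-- ===== SOURCE B (Python) =====
-- def update_module_info(module_name, human_name_mapping):
--     # Build the dotted prefix incrementally, shortest first, and return
--     # the mapping value on the first (i.e. shortest) matching prefix.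
--     parts = module_name.split(".")
--     prefix = parts[0]
--     if prefix in human_name_mapping:
--         return human_name_mapping[prefix]
--     for part in parts[1:]:
--         prefix += "." + part
--         if prefix in human_name_mapping:
--             return human_name_mapping[prefix]
--     return {}
-- ===== Notes on version B (the rewrite author's own statement) =====
-- stated objective: simpler
-- what changed: Instead of scanning all prefixes longest-first and keeping the last match, B builds the dotted prefix incrementally shortest-first (starting from the first component, appending '.'+next each step) and returns the mapping value on the first hit.
import Mathlib
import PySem

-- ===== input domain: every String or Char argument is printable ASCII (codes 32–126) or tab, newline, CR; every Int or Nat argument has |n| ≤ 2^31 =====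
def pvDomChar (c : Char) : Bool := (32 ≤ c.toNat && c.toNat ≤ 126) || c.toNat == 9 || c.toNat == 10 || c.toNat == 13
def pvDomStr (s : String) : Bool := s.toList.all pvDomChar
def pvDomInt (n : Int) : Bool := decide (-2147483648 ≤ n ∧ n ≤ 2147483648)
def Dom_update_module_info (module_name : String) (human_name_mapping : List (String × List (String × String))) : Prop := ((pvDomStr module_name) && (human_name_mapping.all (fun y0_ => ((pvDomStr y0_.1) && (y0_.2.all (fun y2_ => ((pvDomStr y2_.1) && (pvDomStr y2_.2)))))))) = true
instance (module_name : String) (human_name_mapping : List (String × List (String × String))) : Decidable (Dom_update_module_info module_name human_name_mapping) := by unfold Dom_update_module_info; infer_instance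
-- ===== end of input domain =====

-- B builds the dotted prefix incrementally shortest-first and returns on the first hit,
-- instead of A's longest-first re-join of a slice at every step; objective: simpler.

-- ===== PORT A =====
def update_module_info (module_name : String) (human_name_mapping : List (String × List (String × String))) : List (String × String) :=
  let module_sp := (PySem.Str.split? module_name ".").getD []
  let d := PySem.Dict.ofList human_name_mapping
  let n : Int := module_sp.length
  (PySem.List.pyRange 0 n 1).foldl
    (fun human_info i =>
      let m := PySem.Str.join "." (PySem.List.slice module_sp none (some (n - i)))
      if d.contains m then d.getD m [] else human_info) []

-- ===== PORT B =====
-- B's loop: check the current prefix; on a miss extend it by "." + next component and continue.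
def altGo (d : PySem.Dict String (List (String × String))) (pre : String) :
    List String → List (String × String)
  | [] => if d.contains pre then d.getD pre [] else []
  | c :: cs => if d.contains pre then d.getD pre [] else altGo d (pre ++ "." ++ c) cs

def update_module_info_alt (module_name : String) (human_name_mapping : List (String × List (String × String))) : List (String × String) :=
  let parts := (PySem.Str.split? module_name ".").getD []
  let d := PySem.Dict.ofList human_name_mapping
  match parts with
  | [] => []   -- unreachable: str.split always yields at least one piece
  | p :: rest => altGo d p rest

-- ===== PRECONDITION & SPEC =====
def Spec_update_module_info (module_name : String) (human_name_mapping : List (String × List (String × String))) (out : List (String × String)) : Prop := out = update_module_info_alt module_name human_name_mapping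
instance (module_name : String) (human_name_mapping : List (String × List (String × String))) (out : List (String × String)) : Decidable (Spec_update_module_info module_name human_name_mapping out) := by unfold Spec_update_module_info; infer_instance

-- ===== CLAIM (what is proved, stated in full; the proofs are below) =====
def Claim_equal_update_module_info : Prop := ∀ (module_name : String) (human_name_mapping : List (String × List (String × String))), Dom_update_module_info module_name human_name_mapping → Spec_update_module_info module_name human_name_mapping (update_module_info module_name human_name_mapping)

-- ===== LEMMAS AND PROOFS =====

-- proof-side helpers
def pvStep (d : PySem.Dict String (List (String × String)))
    (acc : List (String × String)) (m : String) : List (String × String) :=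
  if d.contains m then d.getD m [] else acc

def pvFirst (d : PySem.Dict String (List (String × String))) :
    List String → List (String × String)
  | [] => []
  | m :: ms => if d.contains m then d.getD m [] else pvFirst d ms

def pvExt (pre : String) (ys : List String) : String :=
  ys.foldl (fun p c => p ++ "." ++ c) pre

def pvIncr (pre : String) : List String → List String
  | [] => [pre]
  | c :: cs => pre :: pvIncr (pre ++ "." ++ c) cs

-- str.split(sep) never returns an empty list of pieces
lemma splitOn_go_ne_nil (sep : List Char) :
    ∀ (fuel : Nat) (l cur : List Char) (acc : List (List Char)),
      PySem.Chars.splitOn.go sep fuel l cur acc ≠ [] := by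
  intro fuel
  induction fuel with
  | zero => intro l cur acc; simp [PySem.Chars.splitOn.go]
  | succ fuel ih =>
      intro l cur acc
      cases l with
      | nil => simp [PySem.Chars.splitOn.go]
      | cons c rest =>
          rw [PySem.Chars.splitOn.go]
          split_ifs <;> exact ih _ _ _

lemma split_getD_ne_nil (s : String) : (PySem.Str.split? s ".").getD [] ≠ [] := by
  simp [PySem.Str.split?, PySem.Chars.split?, PySem.Chars.splitOn]
  exact splitOn_go_ne_nil _ _ _ _ _

-- last match over the reversed list = first match over the list
lemma foldl_rev_eq_first (d : PySem.Dict String (List (String × String))) :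
    ∀ ms : List String, ms.reverse.foldl (pvStep d) [] = pvFirst d ms := by
  intro ms
  induction ms with
  | nil => rfl
  | cons m ms ih =>
      simp only [List.reverse_cons, List.foldl_append, List.foldl_cons, List.foldl_nil, ih]
      by_cases h : d.contains m = true
      · simp [pvStep, pvFirst, h]
      · simp [pvStep, pvFirst, h]

lemma map_sub_range (n : Nat) :
    (List.range n).map (fun k => n - k) = ((List.range n).map (fun k => k + 1)).reverse := by
  induction n with
  | zero => rfl
  | succ n ih =>
      conv_lhs => rw [List.range_succ_eq_map]
      conv_rhs => rw [List.range_succ]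
      simp only [List.map_cons, List.map_map, List.map_append, List.map_nil,
        List.reverse_append, List.reverse_cons, List.reverse_nil, List.nil_append,
        List.cons_append, Nat.sub_zero]
      rw [← ih]
      congr 1
      apply List.map_congr_left
      intro k _
      simp [Function.comp, Nat.succ_sub_succ]

-- a left fold of "++ sep ++" distributes over a prepended prefix (Chars level)
lemma chars_foldl_shift (sep : List Char) :
    ∀ (ys : List (List Char)) (a b : List Char),
      ys.foldl (fun p c => p ++ sep ++ c) (a ++ b) =
        a ++ ys.foldl (fun p c => p ++ sep ++ c) b := by
  intro ys
  induction ys with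
  | nil => intro a b; rfl
  | cons y ys ih =>
      intro a b
      simp only [List.foldl_cons]
      rw [show a ++ b ++ sep ++ y = a ++ (b ++ sep ++ y) by simp [List.append_assoc]]
      exact ih a (b ++ sep ++ y)

-- ".".join(a :: ys) is the incremental left fold (Chars level)
lemma chars_join_eq_foldl (sep : List Char) :
    ∀ (ys : List (List Char)) (a : List Char),
      PySem.Chars.join sep (a :: ys) = ys.foldl (fun p c => p ++ sep ++ c) a := by
  intro ys
  induction ys with
  | nil => intro a; exact PySem.Chars.join_singleton sep a
  | cons y ys ih =>
      intro a
      rw [PySem.Chars.join_cons_cons, ih y]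
      simp only [List.foldl_cons]
      rw [chars_foldl_shift sep ys (a ++ sep) y]

lemma pvExt_toList (ys : List String) :
    ∀ pre : String, (pvExt pre ys).toList =
      (ys.map String.toList).foldl (fun p c => p ++ ['.'] ++ c) pre.toList := by
  induction ys with
  | nil => intro pre; rfl
  | cons y ys ih =>
      intro pre
      show (pvExt (pre ++ "." ++ y) ys).toList = _
      rw [ih (pre ++ "." ++ y)]
      simp only [List.map_cons, List.foldl_cons]
      congr 1
      simp

-- String-level: ".".join(pre :: ys) = pvExt pre ys
lemma join_cons_eq_ext (pre : String) (ys : List String) :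
    PySem.Str.join "." (pre :: ys) = pvExt pre ys := by
  have h : (PySem.Str.join "." (pre :: ys)).toList = (pvExt pre ys).toList := by
    rw [PySem.Str.toList_join, pvExt_toList]
    simp only [List.map_cons]
    rw [chars_join_eq_foldl]
    rfl
  exact String.toList_inj.mp h

lemma incr_eq_map_take (cs : List String) :
    ∀ pre, pvIncr pre cs = (List.range (cs.length + 1)).map (fun k => pvExt pre (cs.take k)) := by
  induction cs with
  | nil => intro pre; rfl
  | cons c cs ih =>
      intro pre
      show pre :: pvIncr (pre ++ "." ++ c) cs = _
      rw [ih (pre ++ "." ++ c)]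
      conv_rhs => rw [List.range_succ_eq_map]
      simp only [List.map_cons, List.map_map, List.take_zero, List.length_cons]
      refine congrArg₂ List.cons rfl ?_
      apply List.map_congr_left
      intro k _
      show pvExt (pre ++ "." ++ c) (cs.take k) = pvExt pre ((c :: cs).take (k + 1))
      rw [List.take_succ_cons]
      rfl

lemma altGo_eq_first (d : PySem.Dict String (List (String × String))) :
    ∀ (rest : List String) (pre : String), altGo d pre rest = pvFirst d (pvIncr pre rest) := by
  intro rest
  induction rest with
  | nil =>
      intro pre
      by_cases h : d.contains pre = true <;> simp [altGo, pvIncr, pvFirst, h]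
  | cons c cs ih =>
      intro pre
      by_cases h : d.contains pre = true <;> simp [altGo, pvIncr, pvFirst, h, ih]

lemma foldl_step_map (d : PySem.Dict String (List (String × String)))
    (g : Nat → String) (l : List Nat) (init : List (String × String)) :
    l.foldl (fun acc k => pvStep d acc (g k)) init = (l.map g).foldl (pvStep d) init := by
  rw [List.foldl_map]

-- ===== VERDICT (by name: the statement is the Claim_ definition above) =====
theorem update_module_info_spec : Claim_equal_update_module_info := by
  intro module_name human_name_mapping _
  unfold Spec_update_module_info update_module_info update_module_info_alt
  set sp := (PySem.Str.split? module_name ".").getD [] with hsp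
  set d := PySem.Dict.ofList human_name_mapping with hd
  simp only
  have hA : (PySem.List.pyRange 0 (sp.length : Int) 1).foldl
      (fun human_info i =>
        let m := PySem.Str.join "." (PySem.List.slice sp none (some ((sp.length : Int) - i)))
        if d.contains m then d.getD m [] else human_info) [] =
      pvFirst d ((List.range sp.length).map (fun k => PySem.Str.join "." (sp.take (k + 1)))) := by
    rw [PySem.List.pyRange_one]
    simp only [Int.sub_zero, Int.toNat_natCast, Int.zero_add]
    rw [List.foldl_map]
    rw [PySem.List.foldl_congr_mem _ _
      (fun acc k => pvStep d acc (PySem.Str.join "." (sp.take (sp.length - k)))) _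
      (by
        intro acc k hk
        have hk' : k < sp.length := List.mem_range.mp hk
        have : (sp.length : Int) - (k : Int) = ((sp.length - k : Nat) : Int) := by omega
        simp only [this, PySem.List.slice_to_natCast, pvStep])]
    rw [foldl_step_map]
    rw [show (List.range sp.length).map (fun k => PySem.Str.join "." (sp.take (sp.length - k))) =
        ((List.range sp.length).map (fun k => sp.length - k)).map
          (fun j => PySem.Str.join "." (sp.take j)) by rw [List.map_map]; rfl]
    rw [map_sub_range, List.map_reverse, List.map_map, foldl_rev_eq_first]
    rfl
  rw [hA]
  cases hcase : sp with
  | nil => exact absurd hcase (by rw [hsp]; exact split_getD_ne_nil module_name)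
  | cons p rest =>
      show _ = altGo d p rest
      rw [altGo_eq_first, incr_eq_map_take]
      congr 1
      apply List.map_congr_left
      intro k _
      rw [show (p :: rest).take (k + 1) = p :: rest.take k from rfl]
      rw [join_cons_eq_ext]
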